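-- pv_equiv track=rewrite | github.com/devgalvas/Python---Curso-Em-V-deo | Projetos Pessoais/MaiorGrandezaPossivel.py | findMaximumGreatness
-- ===== SOURCE A (Python) =====
-- def findMaximumGreatness(arr):
--     sorted_arr = sorted(arr)
--     rearranged_arr = []
--     used_indexes = set()
--
--     for num in arr:
--         for j in range(len(sorted_arr)):
--             if j not in used_indexes and sorted_arr[j] > num:
--                 rearranged_arr.append(sorted_arr[j])
--                 used_indexes.add(j)
--                 break
--         else:
--             for j in range(len(sorted_arr)):
--                 if j not in used_indexes:
--                     rearranged_arr.append(sorted_arr[j])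
--                     used_indexes.add(j)
--                     break
--
--     greatness = sum(1 for i, num in enumerate(rearranged_arr) if num > arr[i])
--     return greatness
-- ===== SOURCE B (Python) =====
-- def findMaximumGreatness(arr):
--     remaining = sorted(arr)
--     greatness = 0
--     for num in arr:
--         # binary search: first index k with remaining[k] > num (bisect_right)
--         lo, hi = 0, len(remaining)
--         while lo < hi:
--             mid = (lo + hi) // 2
--             if num < remaining[mid]:
--                 hi = mid
--             else:
--                 lo = mid + 1
--         if lo < len(remaining):
--             remaining.pop(lo)
--             greatness += 1
--         else:
--             remaining.pop(0)
--     return greatness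
-- ===== Notes on version B (the rewrite author's own statement) =====
-- stated objective: faster
-- what changed: B keeps the unused values as one sorted list it binary-searches and pops, counting as it goes, instead of A's per-element linear scans over all indices with a used-index set plus a final enumerate pass.
import Mathlib
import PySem

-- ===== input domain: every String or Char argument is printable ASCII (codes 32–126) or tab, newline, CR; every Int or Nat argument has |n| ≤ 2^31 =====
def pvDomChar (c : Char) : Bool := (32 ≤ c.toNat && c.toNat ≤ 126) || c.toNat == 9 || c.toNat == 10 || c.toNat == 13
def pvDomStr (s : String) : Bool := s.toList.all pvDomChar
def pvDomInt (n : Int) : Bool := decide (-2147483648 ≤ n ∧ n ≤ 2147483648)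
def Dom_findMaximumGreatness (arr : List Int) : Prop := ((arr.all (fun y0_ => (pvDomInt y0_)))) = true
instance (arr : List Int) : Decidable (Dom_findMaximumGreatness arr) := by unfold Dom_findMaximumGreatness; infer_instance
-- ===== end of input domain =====

-- B replaces A's quadratic inner index scans (and the final enumerate pass) by one loop that
-- keeps the unused values as a sorted list, binary-searches it and pops; objective: faster.


-- ===== PORT A =====
-- inner 'for j in range(len(sorted_arr))' with break: first j with j not in used and sorted_arr[j] > num
-- (j comes from range(len(sorted_arr)), so sorted_arr[j] is always in range: getD's default is never read)
def pvFindMatch (s : List Int) (used : PySem.Set Nat) (num : Int) : Option Nat :=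
  (List.range s.length).find? (fun j => !(PySem.Set.contains used j) && decide (num < s.getD j 0))

-- the for-else fallback scan: first j with j not in used
def pvFindUnused (s : List Int) (used : PySem.Set Nat) : Option Nat :=
  (List.range s.length).find? (fun j => !(PySem.Set.contains used j))

-- one iteration of the outer 'for num in arr' loop; state = (rearranged_arr, used_indexes)
def pvStepA (s : List Int) (st : List Int × PySem.Set Nat) (num : Int) : List Int × PySem.Set Nat :=
  match pvFindMatch s st.2 num with
  | some j => (st.1 ++ [s.getD j 0], PySem.Set.add st.2 j)
  | none =>
    match pvFindUnused s st.2 with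
    | some j => (st.1 ++ [s.getD j 0], PySem.Set.add st.2 j)
    | none => st

def findMaximumGreatness (arr : List Int) : Int :=
  let sorted_arr := PySem.List.sorted arr (fun x => x) false
  let st := arr.foldl (pvStepA sorted_arr) ([], PySem.Set.empty)
  -- greatness = sum(1 for i, num in enumerate(rearranged_arr) if num > arr[i]); i is in range of arr
  (((PySem.List.enumerate st.1 0).countP
      (fun p => decide (PySem.List.pyGetD arr p.1 0 < p.2)) : Nat) : Int)

-- ===== PORT B =====
-- the hand-written 'while lo < hi' binary search of Source B (first k with a[k] > x on a sorted a)
-- (mid = (lo+hi)//2 on naturals is Nat division; mid < hi ≤ len a, so getD's default is never read)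
def pvBisect (a : List Int) (x : Int) (lo hi : Nat) : Nat :=
  if _h : lo < hi then
    let mid := (lo + hi) / 2
    if x < a.getD mid 0 then pvBisect a x lo mid else pvBisect a x (mid + 1) hi
  else lo
termination_by hi - lo
decreasing_by all_goals omega

-- one iteration of Source B's loop; state = (remaining, greatness); the 'none' arms of pop? are
-- unreachable totalisation guards (the popped index is always in range there)
def pvStepB (st : List Int × Int) (num : Int) : List Int × Int :=
  let k := pvBisect st.1 num 0 st.1.length
  if k < st.1.length then
    match PySem.List.pop? st.1 (k : Int) with
    | some r => (r.2, st.2 + 1)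
    | none => st
  else
    match PySem.List.pop? st.1 (0 : Int) with
    | some r => (r.2, st.2)
    | none => st

def findMaximumGreatness_alt (arr : List Int) : Int :=
  (arr.foldl pvStepB (PySem.List.sorted arr (fun x => x) false, 0)).2

-- ===== PRECONDITION & SPEC =====
def Spec_findMaximumGreatness (arr : List Int) (out : Int) : Prop := out = findMaximumGreatness_alt arr
instance (arr : List Int) (out : Int) : Decidable (Spec_findMaximumGreatness arr out) := by unfold Spec_findMaximumGreatness; infer_instance

-- ===== CLAIM (what is proved, stated in full; the proofs are below) =====
def Claim_equal_findMaximumGreatness : Prop := ∀ (arr : List Int), Dom_findMaximumGreatness arr → Spec_findMaximumGreatness arr (findMaximumGreatness arr)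

-- ===== LEMMAS AND PROOFS =====

-- proof-side views of the two loops --------------------------------------------------------

-- ascending list of still-unused indices into s, and their values
def pvUnusedIdx (s : List Int) (used : PySem.Set Nat) : List Nat :=
  (List.range s.length).filter (fun j => !(PySem.Set.contains used j))

def pvUnusedVals (s : List Int) (used : PySem.Set Nat) : List Int :=
  (pvUnusedIdx s used).map (fun j => s.getD j 0)

-- the values A appends while processing xs (A's rearranged-list suffix)
def pvTailR (s : List Int) (used : PySem.Set Nat) : List Int → List Int
  | [] => []
  | num :: xs =>
    match pvFindMatch s used num with
    | some j => s.getD j 0 :: pvTailR s (PySem.Set.add used j) xs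
    | none =>
      match pvFindUnused s used with
      | some j => s.getD j 0 :: pvTailR s (PySem.Set.add used j) xs
      | none => pvTailR s used xs

-- B's greatness increment while processing xs from a remaining list
def pvBRec : List Int → List Int → Int
  | [], _ => 0
  | num :: xs, rem =>
    let k := pvBisect rem num 0 rem.length
    if k < rem.length then 1 + pvBRec xs (rem.eraseIdx k) else pvBRec xs (rem.eraseIdx 0)

-- basic facts about the unused-index list ------------------------------------------------

lemma pv_unusedIdx_nodup (s : List Int) (used : PySem.Set Nat) :
    (pvUnusedIdx s used).Nodup := by
  exact List.Nodup.filter _ List.nodup_range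

lemma pv_unusedIdx_lt (s : List Int) (used : PySem.Set Nat) {j : Nat}
    (h : j ∈ pvUnusedIdx s used) : j < s.length := by
  exact List.mem_range.1 (List.mem_filter.1 h).1

lemma pv_unusedIdx_pairwise (s : List Int) (used : PySem.Set Nat) :
    (pvUnusedIdx s used).Pairwise (· < ·) := by
  exact List.Pairwise.filter _ List.pairwise_lt_range

lemma pv_vals_sorted (s : List Int) (hs : s.Pairwise (· ≤ ·)) (used : PySem.Set Nat) :
    (pvUnusedVals s used).Pairwise (· ≤ ·) := by
  have hU := (pv_unusedIdx_pairwise s used)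
  rw [pvUnusedVals, List.pairwise_map]
  refine List.Pairwise.imp_of_mem ?_ hU
  intro a b ha hb hab
  have ha' := pv_unusedIdx_lt s used ha
  have hb' := pv_unusedIdx_lt s used hb
  rw [List.getD_eq_getElem _ _ ha', List.getD_eq_getElem _ _ hb']
  exact List.pairwise_iff_getElem.1 hs a b ha' hb' hab

lemma pv_unused_add (s : List Int) (used : PySem.Set Nat) (j0 : Nat) :
    pvUnusedIdx s (PySem.Set.add used j0) = (pvUnusedIdx s used).filter (fun j => j != j0) := by
  have hpt : ∀ j : Nat, (!(PySem.Set.contains (PySem.Set.add used j0) j))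
      = ((j != j0) && !(PySem.Set.contains used j)) := by
    intro j
    simp [PySem.Set.mem_add, bne, beq_eq_decide, Bool.and_comm]
  simp only [pvUnusedIdx, List.filter_filter]
  exact List.filter_congr (fun j _ => hpt j)

lemma pv_filter_ne_eq_eraseIdx (U : List Nat) (hU : U.Nodup) (k : Nat) (hk : k < U.length) :
    U.filter (fun j => j != U[k]) = U.eraseIdx k := by
  have h1 : U.idxOf U[k] = k := List.Nodup.idxOf_getElem hU k hk
  have h2 : U.erase U[k] = U.eraseIdx k := List.erase_eq_eraseIdx_of_idxOf h1
  rw [← h2, List.Nodup.erase_eq_filter hU]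

-- the two scans of A, read on the unused-index list ---------------------------------------

lemma pv_findMatch_eq (s : List Int) (used : PySem.Set Nat) (num : Int) :
    pvFindMatch s used num =
      (pvUnusedIdx s used).find? (fun j => decide (num < s.getD j 0)) := by
  rw [pvFindMatch, pvUnusedIdx, List.find?_filter]
  congr 1
  funext j
  simp

lemma pv_findUnused_eq (s : List Int) (used : PySem.Set Nat) :
    pvFindUnused s used = (pvUnusedIdx s used).head? := by
  have h1 : pvFindUnused s used = (pvUnusedIdx s used).find? (fun _ => true) := by
    rw [pvFindUnused, pvUnusedIdx, List.find?_filter]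
    congr 1
    funext j
    simp
  rw [h1]
  cases pvUnusedIdx s used <;> simp

-- binary search: on a sorted list it lands on the first index holding a value > x ---------

lemma pvBisect_inv (a : List Int) (x : Int) (ha : a.Pairwise (· ≤ ·)) :
    ∀ (n lo hi : Nat), hi - lo ≤ n → lo ≤ hi → hi ≤ a.length →
      (∀ i, i < lo → ¬ x < a.getD i 0) → (∀ i, hi ≤ i → i < a.length → x < a.getD i 0) →
      lo ≤ pvBisect a x lo hi ∧ pvBisect a x lo hi ≤ hi ∧
        (∀ i, i < pvBisect a x lo hi → ¬ x < a.getD i 0) ∧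
        (∀ i, pvBisect a x lo hi ≤ i → i < a.length → x < a.getD i 0) := by
  intro n
  induction n with
  | zero =>
    intro lo hi hn hlh hhl hlo hhi
    have hle : hi = lo := by omega
    rw [pvBisect]
    simp only [show ¬ lo < hi by omega, dite_false]
    exact ⟨le_refl lo, by omega, hlo, fun i hi1 hi2 => hhi i (by omega) hi2⟩
  | succ n ih =>
    intro lo hi hn hlh hhl hlo hhi
    rw [pvBisect]
    by_cases h : lo < hi
    · simp only [h, dite_true]
      have hmid1 : lo ≤ (lo + hi) / 2 := by omega
      have hmid2 : (lo + hi) / 2 < hi := by omega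
      by_cases hcmp : x < a.getD ((lo + hi) / 2) 0
      · simp only [hcmp, if_true]
        refine (ih lo ((lo + hi) / 2) (by omega) hmid1 (by omega) hlo ?_).imp_right
          (fun h => ⟨by omega, h.2⟩)
        intro i hi1 hi2
        calc x < a.getD ((lo + hi) / 2) 0 := hcmp
          _ ≤ a.getD i 0 := by
            rw [List.getD_eq_getElem _ _ (by omega), List.getD_eq_getElem _ _ hi2]
            rcases Nat.eq_or_lt_of_le hi1 with h | h
            · simp [h]
            · exact List.pairwise_iff_getElem.1 ha _ _ _ _ h
      · simp only [hcmp, if_false]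
        refine (ih ((lo + hi) / 2 + 1) hi (by omega) (by omega) hhl ?_ hhi).imp_left
          (fun h => by omega)
        intro i hi1 hlt
        have hle : a.getD i 0 ≤ a.getD ((lo + hi) / 2) 0 := by
          rw [List.getD_eq_getElem _ _ (by omega), List.getD_eq_getElem _ _ (by omega)]
          rcases Nat.eq_or_lt_of_le (show i ≤ (lo + hi) / 2 by omega) with h | h
          · simp [h]
          · exact List.pairwise_iff_getElem.1 ha _ _ _ _ h
        exact hcmp (lt_of_lt_of_le hlt hle)
    · simp only [h, dite_false]
      exact ⟨le_refl lo, by omega, hlo, fun i hi1 hi2 => hhi i (by omega) hi2⟩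

lemma pvBisect_eq_findIdx (a : List Int) (x : Int) (ha : a.Pairwise (· ≤ ·)) :
    pvBisect a x 0 a.length = a.findIdx (fun v => decide (x < v)) := by
  obtain ⟨h1, h2, h3, h4⟩ := pvBisect_inv a x ha a.length 0 a.length (by omega) (by omega)
    (le_refl _) (by omega) (by omega)
  set k := pvBisect a x 0 a.length with hk
  by_cases hklt : k < a.length
  · symm
    rw [List.findIdx_eq hklt]
    constructor
    · have := h4 k (le_refl _) hklt
      rw [List.getD_eq_getElem _ _ hklt] at this
      simpa using this
    · intro j hj
      have := h3 j hj
      rw [List.getD_eq_getElem _ _ (by omega)] at this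
      simpa using this
  · have hke : k = a.length := by omega
    rw [hke]
    symm
    rw [List.findIdx_eq_length]
    intro v hv
    obtain ⟨i, hi, rfl⟩ := List.mem_iff_getElem.1 hv
    have := h3 i (by omega)
    rw [List.getD_eq_getElem _ _ hi] at this
    simpa using this

-- the loops of the two ports, as structural recursions ------------------------------------

lemma pv_foldlA (s : List Int) :
    ∀ (xs rearr : List Int) (used : PySem.Set Nat),
      (xs.foldl (pvStepA s) (rearr, used)).1 = rearr ++ pvTailR s used xs := by
  intro xs
  induction xs with
  | nil => intro rearr used; simp [pvTailR]
  | cons num xs ih =>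
    intro rearr used
    simp only [List.foldl_cons]
    rcases hm : pvFindMatch s used num with _ | j
    · rcases hu : pvFindUnused s used with _ | j
      · simp [pvStepA, hm, hu, pvTailR, ih]
      · simp [pvStepA, hm, hu, pvTailR, ih]
    · simp [pvStepA, hm, pvTailR, ih]

lemma pv_foldlB :
    ∀ (xs rem : List Int) (g : Int),
      (xs.foldl pvStepB (rem, g)).2 = g + pvBRec xs rem := by
  intro xs
  induction xs with
  | nil => intro rem g; simp [pvBRec]
  | cons num xs ih =>
    intro rem g
    simp only [List.foldl_cons]
    by_cases hk : pvBisect rem num 0 rem.length < rem.length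
    · have hp := PySem.List.pop?_natCast rem _ hk
      simp only [pvStepB, if_pos hk, hp]
      rw [ih]
      rw [pvBRec]
      simp only [if_pos hk]
      ring
    · cases rem with
      | nil =>
        simp only [pvStepB]
        rw [ih]
        rw [pvBRec]
        simp [PySem.List.pop?]
      | cons r rest =>
        simp only [pvStepB, if_neg hk, PySem.List.pop?_zero_cons]
        rw [ih]
        rw [pvBRec]
        simp only [if_neg hk, List.eraseIdx_cons_zero]

lemma pvTailR_length_le (s : List Int) :
    ∀ (xs : List Int) (used : PySem.Set Nat), (pvTailR s used xs).length ≤ xs.length := by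
  intro xs
  induction xs with
  | nil => intro used; simp [pvTailR]
  | cons num xs ih =>
    intro used
    rw [pvTailR]
    rcases hm : pvFindMatch s used num with _ | j
    · rcases hu : pvFindUnused s used with _ | j
      · simpa using Nat.le_succ_of_le (ih used)
      · simpa using ih _
    · simpa using ih _

-- A's final enumerate-count is a count over the zip with arr ------------------------------

lemma pv_enum_count (arr : List Int) :
    ∀ (r : List Int) (st : Nat), r.length + st ≤ arr.length →
      ((PySem.List.enumerate r (st : Int)).countP
          (fun p => decide (PySem.List.pyGetD arr p.1 0 < p.2)))
        = ((r.zip (arr.drop st)).countP (fun p => decide (p.2 < p.1))) := by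
  intro r
  induction r with
  | nil => intro st h; simp [PySem.List.enumerate]
  | cons x r ih =>
    intro st h
    have hst : st < arr.length := by simp at h; omega
    rw [PySem.List.enumerate_cons, List.countP_cons,
      List.drop_eq_getElem_cons hst, List.zip_cons_cons, List.countP_cons]
    have hcast : (st : Int) + 1 = ((st + 1 : Nat) : Int) := by push_cast; ring
    rw [hcast, ih (st + 1) (by simp at h ⊢; omega)]
    have hget : PySem.List.pyGetD arr (st : Int) 0 = arr[st] := by
      rw [PySem.List.pyGetD_natCast, List.getD_eq_getElem _ _ hst]
    simp [hget]

-- CORE: A's greedy on the unused indices computes exactly B's loop on the unused values ---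

lemma pv_core (s : List Int) (hs : s.Pairwise (· ≤ ·)) :
    ∀ (xs : List Int) (used : PySem.Set Nat),
      xs.length ≤ (pvUnusedIdx s used).length →
      (((pvTailR s used xs).zip xs).countP (fun p => decide (p.2 < p.1)) : Int)
        = pvBRec xs (pvUnusedVals s used) := by
  intro xs
  induction xs with
  | nil => intro used h; simp [pvTailR, pvBRec]
  | cons num xs ih =>
    intro used hlen
    have hVU : pvUnusedVals s used = (pvUnusedIdx s used).map (fun j => s.getD j 0) := rfl
    have hlenVU : (pvUnusedVals s used).length = (pvUnusedIdx s used).length := by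
      rw [hVU]; simp
    have hsorted := pv_vals_sorted s hs used
    have hbis := pvBisect_eq_findIdx (pvUnusedVals s used) num hsorted
    have hkU : (pvUnusedIdx s used).findIdx (fun j => decide (num < s.getD j 0))
        = (pvUnusedVals s used).findIdx (fun v => decide (num < v)) := by
      rw [hVU, List.findIdx_map]; rfl
    by_cases hex : ∃ v ∈ pvUnusedVals s used, decide (num < v)
    · -- a strictly larger unused value exists: both sides take it and count 1
      have hklt : (pvUnusedVals s used).findIdx (fun v => decide (num < v))
          < (pvUnusedVals s used).length := List.findIdx_lt_length_of_exists hex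
      set k := (pvUnusedVals s used).findIdx (fun v => decide (num < v)) with hkdef
      have hkltU : k < (pvUnusedIdx s used).length := by omega
      have hmatch : pvFindMatch s used num = some ((pvUnusedIdx s used)[k]) := by
        rw [pv_findMatch_eq, List.find?_eq_getElem?_findIdx, hkU]
        exact List.getElem?_eq_getElem hkltU
      have hUnew : pvUnusedIdx s (PySem.Set.add used (pvUnusedIdx s used)[k])
          = (pvUnusedIdx s used).eraseIdx k := by
        rw [pv_unused_add, pv_filter_ne_eq_eraseIdx _ (pv_unusedIdx_nodup s used) k hkltU]
      have hVnew : pvUnusedVals s (PySem.Set.add used (pvUnusedIdx s used)[k])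
          = (pvUnusedVals s used).eraseIdx k := by
        rw [pvUnusedVals, hUnew, hVU, List.eraseIdx_map]
      have hlennew : xs.length ≤ (pvUnusedIdx s (PySem.Set.add used (pvUnusedIdx s used)[k])).length := by
        rw [hUnew, List.length_eraseIdx_of_lt hkltU]
        simp at hlen
        omega
      have hval : num < s.getD ((pvUnusedIdx s used)[k]) 0 := by
        have hp : decide (num < (pvUnusedVals s used)[k]) = true := List.findIdx_getElem (w := hklt)
        have : (pvUnusedVals s used)[k] = s.getD ((pvUnusedIdx s used)[k]'hkltU) 0 := by
          simp [hVU]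
        rw [this] at hp
        simpa using hp
      rw [pvTailR]
      simp only [hmatch]
      rw [List.zip_cons_cons, List.countP_cons]
      have hbrec : pvBRec (num :: xs) (pvUnusedVals s used)
          = 1 + pvBRec xs ((pvUnusedVals s used).eraseIdx k) := by
        rw [pvBRec]
        simp only [hbis, if_pos hklt]
      rw [hbrec, ← hVnew, ← ih _ hlennew]
      simp only [List.getD_eq_getElem?_getD] at hval
      simp [hval]
      ring
    · -- every unused value is ≤ num: A falls back to the first unused index, B pops index 0
      have hnone : pvFindMatch s used num = none := by
        rw [pv_findMatch_eq]
        refine List.find?_eq_none.2 (fun j hj hq => hex ⟨s.getD j 0, ?_, hq⟩)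
        rw [hVU]
        exact List.mem_map_of_mem hj
      have hUne : pvUnusedIdx s used ≠ [] := by
        intro h0
        rw [h0] at hlen
        simp at hlen
      have h0lt : 0 < (pvUnusedIdx s used).length := List.length_pos_iff.2 hUne
      have hhead : pvFindUnused s used = some ((pvUnusedIdx s used)[0]) := by
        rw [pv_findUnused_eq, List.head?_eq_getElem?, List.getElem?_eq_getElem h0lt]
      have hkeq : (pvUnusedVals s used).findIdx (fun v => decide (num < v))
          = (pvUnusedVals s used).length := by
        rw [List.findIdx_eq_length]
        intro v hv
        simp only [decide_eq_false_iff_not]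
        exact fun hlt => hex ⟨v, hv, by simpa using hlt⟩
      have hUnew : pvUnusedIdx s (PySem.Set.add used (pvUnusedIdx s used)[0])
          = (pvUnusedIdx s used).eraseIdx 0 := by
        rw [pv_unused_add, pv_filter_ne_eq_eraseIdx _ (pv_unusedIdx_nodup s used) 0 h0lt]
      have hVnew : pvUnusedVals s (PySem.Set.add used (pvUnusedIdx s used)[0])
          = (pvUnusedVals s used).eraseIdx 0 := by
        rw [pvUnusedVals, hUnew, hVU, List.eraseIdx_map]
      have hlennew : xs.length ≤ (pvUnusedIdx s (PySem.Set.add used (pvUnusedIdx s used)[0])).length := by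
        rw [hUnew, List.length_eraseIdx_of_lt h0lt]
        simp at hlen
        omega
      have hval : ¬ num < s.getD ((pvUnusedIdx s used)[0]) 0 := by
        intro hlt
        refine hex ⟨s.getD ((pvUnusedIdx s used)[0]'h0lt) 0, ?_, by simpa using hlt⟩
        rw [hVU]
        exact List.mem_map_of_mem (List.getElem_mem h0lt)
      rw [pvTailR]
      simp only [hnone, hhead]
      rw [List.zip_cons_cons, List.countP_cons]
      have hbrec : pvBRec (num :: xs) (pvUnusedVals s used)
          = pvBRec xs ((pvUnusedVals s used).eraseIdx 0) := by
        rw [pvBRec]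
        simp only [hbis, hkeq, lt_irrefl, if_false]
      rw [hbrec, ← hVnew, ← ih _ hlennew]
      simp only [List.getD_eq_getElem?_getD] at hval
      simp [hval]

lemma pv_unusedVals_empty (s : List Int) : pvUnusedVals s PySem.Set.empty = s := by
  have hidx : pvUnusedIdx s PySem.Set.empty = List.range s.length := by
    rw [pvUnusedIdx]
    apply List.filter_eq_self.2
    intro j _
    rfl
  rw [pvUnusedVals, hidx]
  apply List.ext_getElem
  · simp
  · intro i h1 h2
    simp [List.getElem?_eq_getElem h2]

-- ===== VERDICT (by name: the statement is the Claim_ definition above) =====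
theorem findMaximumGreatness_spec : Claim_equal_findMaximumGreatness := by
  intro arr _hdom
  show findMaximumGreatness arr = findMaximumGreatness_alt arr
  simp only [findMaximumGreatness, findMaximumGreatness_alt]
  have hs : (PySem.List.sorted arr (fun x => x) false).Pairwise (· ≤ ·) :=
    PySem.List.sorted_pairwise arr (fun x => x)
  set s := PySem.List.sorted arr (fun x => x) false with hsdef
  have hlen_s : s.length = arr.length := PySem.List.length_sorted arr _ _
  have hidx : pvUnusedIdx s PySem.Set.empty = List.range s.length := by
    rw [pvUnusedIdx]
    apply List.filter_eq_self.2
    intro j _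
    rfl
  rw [pv_foldlA, pv_foldlB, List.nil_append, zero_add]
  have he := pv_enum_count arr (pvTailR s PySem.Set.empty arr) 0
    (by simpa using pvTailR_length_le s arr PySem.Set.empty)
  simp only [Nat.cast_zero, List.drop_zero] at he
  rw [he]
  have hpre : arr.length ≤ (pvUnusedIdx s PySem.Set.empty).length := by
    rw [hidx, List.length_range, hlen_s]
  rw [pv_core s hs arr PySem.Set.empty hpre, pv_unusedVals_empty]
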